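-- pv_equiv track=rewrite | github.com/AuraMindNest/weblate | weblate/utils/quickbook.py | _parse_bracket_keyword
-- ===== SOURCE A (Python) =====
-- def _parse_bracket_keyword(text: str) -> tuple[str, int]:
--     """Parse keyword and content-start offset from a bracket block string.
--
--     *text* spans the full bracket including the surrounding ``[`` and ``]``.
--
--     Returns ``(keyword, content_offset)`` where *content_offset* is the index
--     within *text* at which the keyword's body begins (i.e. past the keyword
--     token, an optional ``:id`` suffix, and leading whitespace / one newline).
--     """
--     i = 1  # skip opening '['
--     n = len(text)
--
--     # Single-character special keywords: /, #, $, @, ?, :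
--     if i < n and text[i] in ("/", "#", "$", "@", "?", ":"):
--         kw = text[i]
--         i += 1
--         while i < n and text[i] in (" ", "\t"):
--             i += 1
--         return kw, i
--
--     # Multi-character keyword: read until whitespace, ], or :
--     kw_start = i
--     while i < n and text[i] not in (" ", "\t", "\n", "]", ":"):
--         i += 1
--     kw = text[kw_start:i].lower()
--
--     # Optional :id suffix (e.g. ``section:my_anchor``)
--     if i < n and text[i] == ":":
--         i += 1
--         while i < n and text[i] not in (" ", "\t", "\n", "]"):
--             i += 1  # skip the id token
--
--     # Skip trailing spaces / tabs after keyword or :id, then one optional newline.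
--     while i < n and text[i] in (" ", "\t"):
--         i += 1
--     if i < n and text[i] == "\n":
--         i += 1
--
--     return kw, i
-- ===== SOURCE B (Python) =====
-- def _span_until(s, stops):
--     """Length of the prefix of *s* containing none of the chars in *stops*,
--     computed with one str.find pass per stop char instead of a per-position scan."""
--     end = len(s)
--     for c in stops:
--         p = s.find(c)
--         if 0 <= p < end:
--             end = p
--     return end
--
--
-- def _parse_bracket_keyword(text: str) -> tuple[str, int]:
--     body = text[1:]
--
--     # Single-character special keywords: no lowercasing, no newline skip.
--     if body and body[0] in "/#$@?:":
--         pad = body[1:]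
--         return body[0], 2 + len(pad) - len(pad.lstrip(" \t"))
--
--     kw_len = _span_until(body, " \t\n]:")
--     kw = body[:kw_len].lower()
--     j = kw_len
--     if body[j:j + 1] == ":":
--         j += 1 + _span_until(body[j + 1:], " \t\n]")
--     tail = body[j:]
--     stripped = tail.lstrip(" \t")
--     j += len(tail) - len(stripped)
--     if stripped[:1] == "\n":
--         j += 1
--     return kw, 1 + j
-- ===== Notes on version B (the rewrite author's own statement) =====
-- stated objective: faster
-- what changed: B slices off the body once and computes every offset arithmetically: keyword/id token lengths come from one str.find pass per delimiter character combined by min, and whitespace runs from lstrip length differences, instead of A's single advancing-index per-character scan with nested while loops.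
import Mathlib
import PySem

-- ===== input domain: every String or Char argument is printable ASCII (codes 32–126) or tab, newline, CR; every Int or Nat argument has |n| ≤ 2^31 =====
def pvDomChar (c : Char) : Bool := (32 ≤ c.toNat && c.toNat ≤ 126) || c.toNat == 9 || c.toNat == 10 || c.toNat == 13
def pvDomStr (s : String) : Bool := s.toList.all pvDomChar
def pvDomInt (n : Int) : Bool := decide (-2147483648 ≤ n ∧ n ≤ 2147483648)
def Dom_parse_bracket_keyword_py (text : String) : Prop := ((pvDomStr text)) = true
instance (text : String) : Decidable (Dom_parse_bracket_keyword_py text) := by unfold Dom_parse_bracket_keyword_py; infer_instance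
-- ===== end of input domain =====

-- B computes the bracket-block offsets arithmetically (one str.find per delimiter char, min of the
-- first occurrences; lstrip length differences for whitespace runs) instead of A's advancing-index
-- per-character scan: same O(n), measurably faster by a constant factor (bulk string primitives
-- replace the per-character Python loop).

-- ===== PORT A =====
-- Each Python `while` is the obvious structural recursion over the remaining characters,
-- carrying the Python index i (an Int, as in Python).

-- while i < n and text[i] in (" ", "\t"): i += 1
def pvA_skipWs : List Char → Int → List Char × Int
  | c :: cs, i => if c = ' ' ∨ c = '\t' then pvA_skipWs cs (i + 1) else (c :: cs, i)
  | [], i => ([], i)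

-- while i < n and text[i] not in (" ", "\t", "\n", "]", ":"): i += 1  (also collects text[kw_start:i])
def pvA_kw : List Char → Int → List Char × List Char × Int
  | c :: cs, i =>
      if c = ' ' ∨ c = '\t' ∨ c = '\n' ∨ c = ']' ∨ c = ':' then ([], c :: cs, i)
      else
        let r := pvA_kw cs (i + 1)
        (c :: r.1, r.2.1, r.2.2)
  | [], i => ([], [], i)

-- while i < n and text[i] not in (" ", "\t", "\n", "]"): i += 1
def pvA_skipId : List Char → Int → List Char × Int
  | c :: cs, i => if c = ' ' ∨ c = '\t' ∨ c = '\n' ∨ c = ']' then (c :: cs, i) else pvA_skipId cs (i + 1)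
  | [], i => ([], i)

def parse_bracket_keyword_py (text : String) : String × Int :=
  -- i = 1: the whole scan runs over text[1:] (list `drop 1`, exact for the nonnegative index 1)
  match text.toList.drop 1 with
  | [] => ("", 1)  -- every loop guard `i < n` is False; kw = text[1:1] = ""
  | c :: cs =>
    if c = '/' ∨ c = '#' ∨ c = '$' ∨ c = '@' ∨ c = '?' ∨ c = ':' then
      (String.mk [c], (pvA_skipWs cs 2).2)
    else
      let r := pvA_kw (c :: cs) 1
      let kw := PySem.Str.lower (String.mk r.1)
      let s :=
        match r.2.1 with
        | ':' :: rest => pvA_skipId rest (r.2.2 + 1)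
        | other => (other, r.2.2)
      let t := pvA_skipWs s.1 s.2
      let i : Int :=
        match t.1 with
        | '\n' :: _ => t.2 + 1
        | _ => t.2
      (kw, i)

-- ===== PORT B =====
-- _span_until(s, stops): one s.find per stop char, folded with min (s.find(c) = PySem.Chars.find s [c])
def pvB_span (s : List Char) (stops : List Char) : Int :=
  stops.foldl
    (fun e c =>
      let p := PySem.Chars.find s [c]
      if 0 ≤ p ∧ p < e then p else e)
    (s.length : Int)

-- hand port of str.lstrip(" \t") (PySem has no chars-argument lstrip): drop leading ' '/'\t'; exact for this char set
def pvB_lstripWs (s : List Char) : List Char := s.dropWhile (fun c => c == ' ' || c == '\t')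

-- the path below the single-char branch, on body = text[1:] (indices j are Nats: in B they are
-- lengths/find results, always ≥ 0, used only as slice offsets)
def pvB_main (body : List Char) : String × Int :=
  let kwLen := (pvB_span body [' ', '\t', '\n', ']', ':']).toNat
  let kw := PySem.Str.lower (String.mk (body.take kwLen))
  let j :=
    if (body.drop kwLen).take 1 = [':'] then
      kwLen + 1 + (pvB_span (body.drop (kwLen + 1)) [' ', '\t', '\n', ']']).toNat
    else kwLen
  let tail := body.drop j
  let stripped := pvB_lstripWs tail
  let j2 := j + (tail.length - stripped.length)
  let j3 := if stripped.take 1 = ['\n'] then j2 + 1 else j2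
  (kw, 1 + (j3 : Int))

def parse_bracket_keyword_py_alt (text : String) : String × Int :=
  let body := text.toList.drop 1
  match body with
  | c :: cs =>
    -- if body and body[0] in "/#$@?:"
    if c = '/' ∨ c = '#' ∨ c = '$' ∨ c = '@' ∨ c = '?' ∨ c = ':' then
      (String.mk [c], 2 + (cs.length : Int) - ((pvB_lstripWs cs).length : Int))
    else pvB_main (c :: cs)
  | [] => pvB_main []

-- ===== PRECONDITION & SPEC =====
def Spec_parse_bracket_keyword_py (text : String) (out : String × Int) : Prop := out = parse_bracket_keyword_py_alt text
instance (text : String) (out : String × Int) : Decidable (Spec_parse_bracket_keyword_py text out) := by unfold Spec_parse_bracket_keyword_py; infer_instance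

-- ===== CLAIM (what is proved, stated in full; the proofs are below) =====
def Claim_equal_parse_bracket_keyword_py : Prop := ∀ (text : String), Dom_parse_bracket_keyword_py text → Spec_parse_bracket_keyword_py text (parse_bracket_keyword_py text)


-- ===== LEMMAS AND PROOFS =====

-- the fold step of pvB_span
def pvStep (s : List Char) (e : Int) (c : Char) : Int :=
  let p := PySem.Chars.find s [c]
  if 0 ≤ p ∧ p < e then p else e

theorem pvB_span_eq_fold (s stops : List Char) :
    pvB_span s stops = stops.foldl (pvStep s) (s.length : Int) := rfl

-- [d] is a prefix of l iff l starts with d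
theorem pv_singleton_prefix (d : Char) (l : List Char) : [d] <+: l ↔ ∃ t, l = d :: t := by
  cases l with
  | nil => simp
  | cons a t => simp [List.prefix_cons_iff, eq_comm]
theorem pv_tw_len (p : Char → Bool) :
    ∀ (s : List Char) (k : Nat), k < s.length →
      (∀ i, i < k → p (s.getD i ' ') = true) → p (s.getD k ' ') = false →
      (s.takeWhile p).length = k := by
  intro s
  induction s with
  | nil => intro k hk; simp at hk
  | cons c cs ih =>
    intro k hk hlt hk0
    cases k with
    | zero => simp at hk0; simp [List.takeWhile_cons, hk0]
    | succ k' =>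
      have h0 : p c = true := hlt 0 (Nat.succ_pos _)
      simp [List.takeWhile_cons, h0]
      exact ih k' (by simpa using hk) (fun i hi => hlt (i+1) (by omega)) (by simpa using hk0)
theorem pv_find_mem (s : List Char) (d : Char) (h : d ∈ s) :
    PySem.Chars.find s [d] = ((s.takeWhile (fun c => !(c == d))).length : Int) := by
  have hinf : [d] <:+: s := (List.singleton_infix_iff d s).mpr h
  have hnn : 0 ≤ PySem.Chars.find s [d] := (PySem.Chars.find_nonneg_iff s [d]).mpr hinf
  obtain ⟨hpre, hmin⟩ := PySem.Chars.find_spec (s := s) (sub := [d]) hnn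
  set k := (PySem.Chars.find s [d]).toNat with hkdef
  obtain ⟨t, ht⟩ := (pv_singleton_prefix d _).mp hpre
  have hklt : k < s.length := by
    have := congrArg List.length ht
    simp [List.length_drop] at this
    omega
  have hout : PySem.Chars.find s [d] = (k : Int) := (Int.toNat_of_nonneg hnn).symm
  rw [hout]
  congr 1
  refine (pv_tw_len _ s k hklt ?_ ?_).symm
  · intro i hi
    have hne : s.getD i ' ' ≠ d := by
      intro hEq
      apply hmin i hi
      have hilt : i < s.length := by omega
      rw [List.drop_eq_getElem_cons hilt]
      rw [pv_singleton_prefix]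
      exact ⟨_, by rw [List.getD_eq_getElem s ' ' hilt] at hEq; rw [hEq]⟩
    simp [List.getD] at hne ⊢
    simpa using hne
  · have : s.getD k ' ' = d := by
      have := List.drop_eq_getElem_cons hklt
      rw [this] at ht
      have : s[k] = d := by injection ht
      rw [List.getD_eq_getElem s ' ' hklt, this]
    simp [List.getD] at this
    simp [this]
theorem pv_find_not_mem (s : List Char) (d : Char) (h : d ∉ s) :
    PySem.Chars.find s [d] = -1 := by
  rw [PySem.Chars.find_eq_neg_one_iff]
  rw [List.singleton_infix_iff]
  exact h
theorem pv_fold_bounds (s : List Char) :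
    ∀ (stops : List Char) (e : Int), 0 ≤ e →
      0 ≤ stops.foldl (pvStep s) e ∧ stops.foldl (pvStep s) e ≤ e := by
  intro stops
  induction stops with
  | nil => intro e he; exact ⟨by simpa using he, by simp⟩
  | cons d ds ih =>
    intro e he
    simp only [List.foldl_cons]
    have h1 : 0 ≤ pvStep s e d ∧ pvStep s e d ≤ e := by
      unfold pvStep; dsimp only; split_ifs with h
      · exact ⟨h.1, le_of_lt h.2⟩
      · exact ⟨he, le_refl e⟩
    obtain ⟨a, b⟩ := ih (pvStep s e d) h1.1
    exact ⟨a, le_trans b h1.2⟩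
theorem pv_fold_keep (s : List Char) :
    ∀ (stops : List Char) (e : Int), (∀ d ∈ stops, PySem.Chars.find s [d] = -1) →
      stops.foldl (pvStep s) e = e := by
  intro stops
  induction stops with
  | nil => intro e _; simp
  | cons d ds ih =>
    intro e h
    have hd := h d (by simp)
    simp only [List.foldl_cons]
    have : pvStep s e d = e := by unfold pvStep; rw [hd]; norm_num
    rw [this]
    exact ih e (fun d' hd' => h d' (by simp [hd']))
theorem pv_fold_zero (s : List Char) :
    ∀ (stops : List Char) (c' : Char), c' ∈ stops → PySem.Chars.find s [c'] = 0 →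
      ∀ e : Int, 0 ≤ e → stops.foldl (pvStep s) e = 0 := by
  intro stops
  induction stops with
  | nil => intro c' h; simp at h
  | cons d ds ih =>
    intro c' hmem hf e he
    simp only [List.foldl_cons]
    rcases List.mem_cons.mp hmem with heq | hmem'
    · subst heq
      have hstep : pvStep s e c' = 0 ∨ (pvStep s e c' = e ∧ e = 0) := by
        unfold pvStep; rw [hf]; dsimp only; split_ifs with h
        · exact Or.inl rfl
        · right; constructor; rfl; omega
      rcases hstep with h0 | ⟨hE, h0⟩
      · rw [h0]
        have := pv_fold_bounds s ds 0 (le_refl 0)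
        omega
      · rw [hE, h0]
        have := pv_fold_bounds s ds 0 (le_refl 0)
        omega
    · have h1 : 0 ≤ pvStep s e d := by
        unfold pvStep; dsimp only; split_ifs with h
        · exact h.1
        · exact he
      exact ih c' hmem' hf _ h1
theorem pv_fold_shift (c : Char) (cs : List Char) :
    ∀ (stops : List Char), (∀ d ∈ stops, d ≠ c) →
      ∀ e : Int, 0 ≤ e →
        stops.foldl (pvStep (c :: cs)) (e + 1) = stops.foldl (pvStep cs) e + 1 := by
  intro stops
  induction stops with
  | nil => intro _ e _; simp
  | cons d ds ih =>
    intro hne e he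
    have hdc : d ≠ c := hne d (by simp)
    simp only [List.foldl_cons]
    have hstep : pvStep (c :: cs) (e + 1) d = pvStep cs e d + 1 := by
      by_cases hm : d ∈ cs
      · have h1 := pv_find_mem (c :: cs) d (by simp [hm])
        have h2 := pv_find_mem cs d hm
        have hpc : (c == d) = false := by simp [Ne.symm hdc]
        rw [List.takeWhile_cons] at h1
        simp [hpc] at h1
        unfold pvStep
        rw [h1, h2]
        simp only [List.length_cons]
        push_cast
        have hnn : (0:Int) ≤ ((cs.takeWhile (fun x => !(x == d))).length : Int) := by positivity
        split_ifs with ha hb hb <;> omega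
      · have h1 := pv_find_not_mem (c :: cs) d (by simp [hm]; exact hdc)
        have h2 := pv_find_not_mem cs d hm
        unfold pvStep
        rw [h1, h2]
        norm_num
    rw [hstep]
    have h0 : 0 ≤ pvStep cs e d := by
      unfold pvStep; dsimp only; split_ifs with h
      · exact h.1
      · exact he
    exact ih (fun d' hd' => hne d' (by simp [hd'])) _ h0
theorem pv_span_eq (stops : List Char) :
    ∀ s : List Char,
      pvB_span s stops = ((s.takeWhile (fun c => !(stops.contains c))).length : Int) := by
  intro s
  induction s with
  | nil =>
    rw [pvB_span_eq_fold]
    rw [pv_fold_keep [] stops _ (fun d _ => pv_find_not_mem [] d (by simp))]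
    simp
  | cons c cs ih =>
    rw [pvB_span_eq_fold]
    by_cases hc : c ∈ stops
    · have hf : PySem.Chars.find (c :: cs) [c] = 0 := by
        rw [pv_find_mem (c :: cs) c (by simp)]
        simp
      rw [pv_fold_zero (c :: cs) stops c hc hf _ (by positivity)]
      simp [List.takeWhile_cons, hc]
    · have hne : ∀ d ∈ stops, d ≠ c := fun d hd => by
        intro hEq; exact hc (hEq ▸ hd)
      have hl : ((c :: cs).length : Int) = (cs.length : Int) + 1 := by simp
      rw [hl, pv_fold_shift c cs stops hne _ (by positivity)]
      rw [← pvB_span_eq_fold, ih]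
      simp [List.takeWhile_cons, hc]
theorem pv_take_tw (p : Char → Bool) (l : List Char) :
    l.take (l.takeWhile p).length = l.takeWhile p := by
  induction l with
  | nil => simp
  | cons c cs ih => by_cases h : p c <;> simp [List.takeWhile_cons, h, ih]
theorem pv_drop_tw (p : Char → Bool) (l : List Char) :
    l.drop (l.takeWhile p).length = l.dropWhile p := by
  induction l with
  | nil => simp
  | cons c cs ih => by_cases h : p c <;> simp [List.takeWhile_cons, List.dropWhile_cons, h, ih]
theorem pv_tw_dw_len (p : Char → Bool) (l : List Char) :
    (l.takeWhile p).length + (l.dropWhile p).length = l.length := by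
  have := congrArg List.length (List.takeWhile_append_dropWhile (p := p) (l := l))
  rw [List.length_append] at this
  omega
theorem pvA_skipWs_eq (cs : List Char) (i : Int) :
    pvA_skipWs cs i =
      (cs.dropWhile (fun c => c == ' ' || c == '\t'),
       i + ((cs.takeWhile (fun c => c == ' ' || c == '\t')).length : Int)) := by
  induction cs generalizing i with
  | nil => simp [pvA_skipWs]
  | cons c cs ih =>
    by_cases h : c = ' ' ∨ c = '\t'
    · have hb : (c == ' ' || c == '\t') = true := by rcases h with h | h <;> simp [h]
      rw [pvA_skipWs, if_pos h, ih]
      simp [List.dropWhile_cons, List.takeWhile_cons, hb]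
      ring
    · have hb : (c == ' ' || c == '\t') = false := by
        simp only [Bool.or_eq_false_iff, beq_eq_false_iff_ne]
        exact ⟨fun h1 => h (Or.inl h1), fun h2 => h (Or.inr h2)⟩
      rw [pvA_skipWs, if_neg h]
      simp [List.dropWhile_cons, List.takeWhile_cons, hb]
theorem pvA_kw_eq (cs : List Char) (i : Int) :
    pvA_kw cs i =
      (cs.takeWhile (fun c => !([' ', '\t', '\n', ']', ':'].contains c)),
       cs.dropWhile (fun c => !([' ', '\t', '\n', ']', ':'].contains c)),
       i + ((cs.takeWhile (fun c => !([' ', '\t', '\n', ']', ':'].contains c))).length : Int)) := by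
  induction cs generalizing i with
  | nil => simp [pvA_kw]
  | cons c cs ih =>
    by_cases h : c = ' ' ∨ c = '\t' ∨ c = '\n' ∨ c = ']' ∨ c = ':'
    · have hm : c ∈ [' ', '\t', '\n', ']', ':'] := by simp; tauto
      rw [pvA_kw, if_pos h]
      simp [List.dropWhile_cons, List.takeWhile_cons, hm]
      tauto
    · obtain ⟨h1, h2, h3, h4, h5⟩ : ¬c = ' ' ∧ ¬c = '\t' ∧ ¬c = '\n' ∧ ¬c = ']' ∧ ¬c = ':' := by tauto
      rw [pvA_kw, if_neg h]
      simp only [ih]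
      simp [List.dropWhile_cons, List.takeWhile_cons, h1, h2, h3, h4, h5]
      ring
theorem pvA_skipId_eq (cs : List Char) (i : Int) :
    pvA_skipId cs i =
      (cs.dropWhile (fun c => !([' ', '\t', '\n', ']'].contains c)),
       i + ((cs.takeWhile (fun c => !([' ', '\t', '\n', ']'].contains c))).length : Int)) := by
  induction cs generalizing i with
  | nil => simp [pvA_skipId]
  | cons c cs ih =>
    by_cases h : c = ' ' ∨ c = '\t' ∨ c = '\n' ∨ c = ']'
    · have hm : c ∈ [' ', '\t', '\n', ']'] := by simp; tauto
      rw [pvA_skipId, if_pos h]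
      simp [List.dropWhile_cons, List.takeWhile_cons, hm]
      tauto
    · obtain ⟨h1, h2, h3, h4⟩ : ¬c = ' ' ∧ ¬c = '\t' ∧ ¬c = '\n' ∧ ¬c = ']' := by tauto
      rw [pvA_skipId, if_neg h]
      simp only [ih]
      simp [List.dropWhile_cons, List.takeWhile_cons, h1, h2, h3, h4]
      ring
theorem pv_ws_nl (l : List Char) (i : Int) (j : Nat) (hij : i = 1 + (j : Int)) :
    (match (pvA_skipWs l i).1 with
      | '\n' :: _ => (pvA_skipWs l i).2 + 1
      | _ => (pvA_skipWs l i).2)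
    = 1 + (((if (pvB_lstripWs l).take 1 = ['\n']
              then j + (l.length - (pvB_lstripWs l).length) + 1
              else j + (l.length - (pvB_lstripWs l).length)) : Nat) : Int) := by
  subst hij
  have hA := pvA_skipWs_eq l (1 + (j : Int))
  have htot := pv_tw_dw_len (fun c => c == ' ' || c == '\t') l
  rw [hA]
  unfold pvB_lstripWs
  obtain ⟨T, hT⟩ : ∃ T, (l.takeWhile (fun c => c == ' ' || c == '\t')).length = T := ⟨_, rfl⟩
  rw [hT] at htot ⊢
  cases hd : l.dropWhile (fun c => c == ' ' || c == '\t') with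
  | nil =>
    rw [hd] at htot
    simp only [List.length_nil] at htot
    simp only [hd, List.take_nil, List.length_nil]
    rw [if_neg (by simp : ¬(([] : List Char) = ['\n']))]
    rw [← htot]
    simp only [Nat.add_zero, Nat.sub_zero]
    push_cast
    ring
  | cons e es =>
    rw [hd] at htot
    simp only [List.length_cons] at htot
    simp only [hd, List.take_cons, List.take_zero, List.length_cons]
    by_cases he : e = '\n'
    · subst he
      rw [show List.take 1 ('\n' :: es) = ['\n'] from rfl, if_pos rfl]
      split
      · rw [← htot]
        simp only [Nat.add_sub_cancel]
        push_cast
        ring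
      · rename_i h
        exact ((h es) rfl).elim
    · have hne : ¬([e] = ['\n']) := by simp [he]
      rw [show List.take 1 (e :: es) = [e] from rfl, if_neg hne]
      split
      · rename_i heq
        exfalso
        exact he (by injection heq)
      · rw [← htot]
        simp only [Nat.add_sub_cancel]
        push_cast
        ring

-- the multi-character path of A equals pvB_main
theorem pv_main_eq (body : List Char) :
    (let r := pvA_kw body 1
     let kw := PySem.Str.lower (String.mk r.1)
     let s :=
       match r.2.1 with
       | ':' :: rest => pvA_skipId rest (r.2.2 + 1)
       | other => (other, r.2.2)
     let t := pvA_skipWs s.1 s.2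
     let i : Int :=
       match t.1 with
       | '\n' :: _ => t.2 + 1
       | _ => t.2
     ((kw, i) : String × Int)) = pvB_main body := by
  have hspan1 : (pvB_span body [' ', '\t', '\n', ']', ':']).toNat
      = (body.takeWhile (fun c => !([' ', '\t', '\n', ']', ':'].contains c))).length := by
    rw [pv_span_eq]
    simp
  unfold pvB_main
  rw [pvA_kw_eq]
  dsimp only
  rw [hspan1, pv_take_tw, pv_drop_tw]
  cases hdw : body.dropWhile (fun c => !([' ', '\t', '\n', ']', ':'].contains c)) with
  | nil =>
    rw [if_neg (by simp : ¬(List.take 1 ([] : List Char) = [':']))]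
    rw [pv_drop_tw, hdw]
    refine Prod.ext rfl ?_
    exact pv_ws_nl [] _ _ rfl
  | cons d rest =>
    by_cases hdc : d = ':'
    · subst hdc
      rw [show List.take 1 (':' :: rest) = [':'] from rfl, if_pos rfl]
      have hdrop1 : List.drop ((body.takeWhile (fun c => !([' ', '\t', '\n', ']', ':'].contains c))).length + 1) body = rest := by
        rw [← List.drop_drop, pv_drop_tw, hdw]
        simp
      rw [hdrop1]
      have hspan2 : (pvB_span rest [' ', '\t', '\n', ']']).toNat
          = (rest.takeWhile (fun c => !([' ', '\t', '\n', ']'].contains c))).length := by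
        rw [pv_span_eq]
        simp
      have hm2 : (match (':' :: rest : List Char) with
          | ':' :: rest => pvA_skipId rest (1 + ((body.takeWhile (fun c => !([' ', '\t', '\n', ']', ':'].contains c))).length : Int) + 1)
          | other => (other, 1 + ((body.takeWhile (fun c => !([' ', '\t', '\n', ']', ':'].contains c))).length : Int)))
          = pvA_skipId rest (1 + ((body.takeWhile (fun c => !([' ', '\t', '\n', ']', ':'].contains c))).length : Int) + 1) := rfl
      rw [hspan2, hm2, pvA_skipId_eq]
      have hdrop2 : List.drop ((body.takeWhile (fun c => !([' ', '\t', '\n', ']', ':'].contains c))).length + 1 + (rest.takeWhile (fun c => !([' ', '\t', '\n', ']'].contains c))).length) body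
          = rest.dropWhile (fun c => !([' ', '\t', '\n', ']'].contains c)) := by
        rw [← List.drop_drop, hdrop1, pv_drop_tw]
      rw [hdrop2]
      refine Prod.ext rfl ?_
      exact pv_ws_nl _ _ _ (by push_cast; ring)
    · rw [show List.take 1 (d :: rest) = [d] from rfl,
          if_neg (by simp [hdc] : ¬([d] = [':']))]
      rw [pv_drop_tw, hdw]
      have hmatch : (match d :: rest with
          | ':' :: rest => pvA_skipId rest (1 + ((body.takeWhile (fun c => !([' ', '\t', '\n', ']', ':'].contains c))).length : Int) + 1)
          | other => (other, 1 + ((body.takeWhile (fun c => !([' ', '\t', '\n', ']', ':'].contains c))).length : Int)))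
          = (d :: rest, 1 + ((body.takeWhile (fun c => !([' ', '\t', '\n', ']', ':'].contains c))).length : Int)) := by
        split
        · rename_i heq
          exact absurd (by injection heq) hdc
        · rfl
      rw [hmatch]
      refine Prod.ext rfl ?_
      exact pv_ws_nl _ _ _ rfl

-- ===== VERDICT (by name: the statement is the Claim_ definition above) =====
theorem parse_bracket_keyword_py_spec : Claim_equal_parse_bracket_keyword_py := by
  intro text _
  unfold Spec_parse_bracket_keyword_py parse_bracket_keyword_py parse_bracket_keyword_py_alt
  cases h : text.toList.drop 1 with
  | nil => decide
  | cons c cs =>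
    by_cases hc : c = '/' ∨ c = '#' ∨ c = '$' ∨ c = '@' ∨ c = '?' ∨ c = ':'
    · simp only [hc, if_true, pvA_skipWs_eq, pvB_lstripWs]
      refine Prod.ext rfl ?_
      have := pv_tw_dw_len (fun c => c == ' ' || c == '\t') cs
      simp only []
      push_cast
      omega
    · simp only [hc, if_false]
      exact pv_main_eq (c :: cs)
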